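-- pv_equiv track=rewrite | github.com/AP-MI-2021/lab-3-mirunaxb | main.py | get_longest_div_k
-- ===== SOURCE A (Python) =====
-- def nr_div_k(n , k):
--     '''
--     Verificam ca nr sa fie divizbil cu k
--     :param n: nr intreg
--     :return: True daca nr e divizibil cu k, False altfel
--     '''
--     return n % k == 0
--
-- def list_elem_div_k(list , k):
--     '''
--     Verificam ca lista are doar elemente cu propr. div k.
--     :param lista: lista de nr intregi
--     :return: True daca lista are are doar elem div k, False altfel
--     '''
--     for x in list:
--         if not nr_div_k(x , k):
--             return False
--     return True
--
-- def get_longest_div_k(list , k):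
--     '''
--     Determinarea secventei de lungime maxima a numerelor divizibile cu k.
--     :param lista: lista de nr. intregi
--     :param k: numar intreg
--     :return: (nr intreg) lungimea maxima de multipli ai lui k din lista citita
--     '''
--     rez = []
--     lung_lista = len(list)
--     for i in range(lung_lista):
--         for j in range(i, lung_lista):
--             list_de_verificat = list[i:j + 1]
--             if list_elem_div_k(list_de_verificat , k) and len(list_de_verificat) > len(rez):
--                 rez = list_de_verificat[:]
--     return rez
-- ===== SOURCE B (Python) =====
-- def get_longest_div_k(list, k):
--     n = len(list)
--     best_s = 0
--     best_l = 0
--     i = 0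
--     while i < n:
--         if list[i] % k == 0:
--             j = i + 1
--             while j < n and list[j] % k == 0:
--                 j += 1
--             if j - i > best_l:
--                 best_s, best_l = i, j - i
--             i = j + 1
--         else:
--             i += 1
--     return list[best_s:best_s + best_l]
-- ===== Notes on version B (the rewrite author's own statement) =====
-- stated objective: faster
-- what changed: A tests every one of the O(n^2) windows element by element for divisibility; B makes a single left-to-right pass that skips over each maximal divisible run and keeps the first longest one, returning it as one slice.
import Mathlib
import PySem

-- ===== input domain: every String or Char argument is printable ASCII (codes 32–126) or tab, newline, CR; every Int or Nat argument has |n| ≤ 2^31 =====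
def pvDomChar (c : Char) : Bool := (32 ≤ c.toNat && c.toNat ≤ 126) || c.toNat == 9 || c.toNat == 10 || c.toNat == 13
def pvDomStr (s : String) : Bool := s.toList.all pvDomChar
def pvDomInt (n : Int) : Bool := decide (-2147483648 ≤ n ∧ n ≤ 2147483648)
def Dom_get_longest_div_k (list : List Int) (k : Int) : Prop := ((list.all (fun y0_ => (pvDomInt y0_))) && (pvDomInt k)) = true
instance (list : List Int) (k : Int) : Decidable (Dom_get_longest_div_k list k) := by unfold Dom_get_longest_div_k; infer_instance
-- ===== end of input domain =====

-- B replaces A's cubic all-windows scan by a single left-to-right pass that skips over each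
-- maximal divisible run and keeps the first longest one (objective: faster).

-- ===== PORT A =====
def nr_div_k (n k : Int) : Bool := PySem.Int.mod n k == 0

def list_elem_div_k : List Int → Int → Bool
  | [], _ => true
  | x :: t, k => if !(nr_div_k x k) then false else list_elem_div_k t k

def get_longest_div_k (list : List Int) (k : Int) : List Int :=
  let lung := PySem.List.len list
  (PySem.List.pyRange 0 lung 1).foldl (fun rez i =>
    (PySem.List.pyRange i lung 1).foldl (fun rez j =>
      let sub := PySem.List.slice list (some i) (some (j + 1))
      if list_elem_div_k sub k && PySem.List.len sub > PySem.List.len rez then sub else rez) rez) []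

-- ===== PORT B =====
-- inner `while j < n and list[j] % k == 0: j += 1`
def runEndB (list : List Int) (k n j : Int) : Int :=
  if h : j < n ∧ (((PySem.List.pyGet? list j).map (fun x => PySem.Int.mod x k == 0)).getD false = true)
  then runEndB list k n (j + 1)
  else j
termination_by (n - j).toNat
decreasing_by have := h.1; omega

-- needed only for the termination of bLoopB: the inner while never moves j backwards
theorem runEndB_ge (list : List Int) (k n j : Int) : j ≤ runEndB list k n j := by
  rw [runEndB]
  split
  · next h => have := runEndB_ge list k n (j + 1); omega
  · omega
termination_by (n - j).toNat
decreasing_by rename_i h; have := h.1; omega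

-- outer `while i < n: …`
def bLoopB (list : List Int) (k n i bs bl : Int) : Int × Int :=
  if hi : i < n then
    if ((PySem.List.pyGet? list i).map (fun x => PySem.Int.mod x k == 0)).getD false then
      let j := runEndB list k n (i + 1)
      let p := if j - i > bl then (i, j - i) else (bs, bl)
      bLoopB list k n (j + 1) p.1 p.2
    else
      bLoopB list k n (i + 1) bs bl
  else (bs, bl)
termination_by (n - i).toNat
decreasing_by
  · have hj : i + 1 ≤ runEndB list k n (i + 1) := runEndB_ge list k n (i + 1)
    omega
  · omega

def get_longest_div_k_alt (list : List Int) (k : Int) : List Int :=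
  let n := PySem.List.len list
  let p := bLoopB list k n 0 0 0
  PySem.List.slice list (some p.1) (some (p.1 + p.2))

-- ===== PRECONDITION & SPEC =====
-- Pre_ excludes only the inputs on which Python A raises ZeroDivisionError: k = 0 with a nonempty list.
def Pre_get_longest_div_k (list : List Int) (k : Int) : Prop := list = [] ∨ k ≠ 0
instance (list : List Int) (k : Int) : Decidable (Pre_get_longest_div_k list k) := by unfold Pre_get_longest_div_k; infer_instance

def pvWitness_get_longest_div_k : List Int × Int := ([4, 3, 6, 8, 2, 5], 2)

def Spec_get_longest_div_k (list : List Int) (k : Int) (out : List Int) : Prop := out = get_longest_div_k_alt list k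
instance (list : List Int) (k : Int) (out : List Int) : Decidable (Spec_get_longest_div_k list k out) := by unfold Spec_get_longest_div_k; infer_instance

-- ===== CLAIM (what is proved, stated in full; the proofs are below) =====
def Claim_equal_get_longest_div_k : Prop := ∀ (list : List Int) (k : Int), Dom_get_longest_div_k list k → Pre_get_longest_div_k list k → Spec_get_longest_div_k list k (get_longest_div_k list k)

-- ===== LEMMAS AND PROOFS =====
-- the divisibility test both programs use
def dvb (k x : Int) : Bool := PySem.Int.mod x k == 0
-- length of the divisible run starting at index m
def runAt (list : List Int) (k : Int) (m : Nat) : Nat := ((list.drop m).takeWhile (dvb k)).length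
-- the window of length r starting at m
def win (list : List Int) (m r : Nat) : List Int := (list.drop m).take r
-- the abstract outer-loop step A performs for start index i (proved in inner_eq_ostep)
def ostep (list : List Int) (k : Int) (rez : List Int) (i : Int) : List Int :=
  if runAt list k i.toNat > rez.length then win list i.toNat (runAt list k i.toNat) else rez

theorem list_elem_div_k_eq_all (l : List Int) (k : Int) :
    list_elem_div_k l k = l.all (dvb k) := by
  induction l with
  | nil => rfl
  | cons x t ih =>
    simp only [list_elem_div_k, nr_div_k, List.all_cons, ih]
    cases h : (PySem.Int.mod x k == 0) <;> simp [dvb, h]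

theorem all_take_iff (k : Int) (s : List Int) (m : Nat) (hm : m ≤ s.length) :
    ((s.take m).all (dvb k) = true ↔ m ≤ (s.takeWhile (dvb k)).length) := by
  induction s generalizing m with
  | nil =>
    have : m = 0 := by simpa using hm
    subst this; simp
  | cons x t ih =>
    cases m with
    | zero => simp
    | succ m' =>
      simp only [List.take_succ_cons, List.all_cons, List.takeWhile_cons]
      by_cases hx : dvb k x
      · simp [hx, ih m' (by simpa using hm)]
      · simp [hx]

theorem runAt_le (list : List Int) (k : Int) (m : Nat) : runAt list k m ≤ list.length - m := by
  have h : ((list.drop m).takeWhile (dvb k)).length ≤ (list.drop m).length := by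
    induction (list.drop m) with
    | nil => simp
    | cons x t ih =>
      by_cases hx : dvb k x
      · simp [hx]; omega
      · simp [hx]
  simpa [runAt] using h

theorem runAt_succ (list : List Int) (k : Int) (m : Nat) (hm : m < list.length) :
    runAt list k m = if dvb k list[m] then runAt list k (m + 1) + 1 else 0 := by
  have hd : list.drop m = list[m] :: list.drop (m + 1) := List.drop_eq_getElem_cons hm
  unfold runAt
  rw [hd, List.takeWhile_cons]
  by_cases h : dvb k list[m] <;> simp [h]

theorem runAt_pos_lt (list : List Int) (k : Int) (m : Nat) (h : 0 < runAt list k m) :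
    m < list.length := by
  have := runAt_le list k m; omega

theorem runAt_add (list : List Int) (k : Int) (m : Nat) :
    ∀ t, t ≤ runAt list k m → runAt list k (m + t) = runAt list k m - t := by
  intro t
  induction t with
  | zero => simp
  | succ t' ih =>
    intro ht
    have h1 : runAt list k (m + t') = runAt list k m - t' := ih (by omega)
    have hpos : 0 < runAt list k (m + t') := by omega
    have hlt : m + t' < list.length := runAt_pos_lt list k _ hpos
    have hs := runAt_succ list k (m + t') hlt
    by_cases hx : dvb k list[m + t']
    · simp only [hx, if_true] at hs
      have he : m + (t' + 1) = m + t' + 1 := by omega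
      rw [he]; omega
    · simp [hx] at hs; omega

theorem sub_eq_win (list : List Int) (i j : Nat) :
    PySem.List.slice list (some (i : Int)) (some ((i : Int) + ((j : Nat) : Int))) = win list i j := by
  simpa [win] using PySem.List.slice_natCast_add (xs := list) (j := i) (n := j)

theorem len_win (list : List Int) (m r : Nat) (h : m + r ≤ list.length) :
    (win list m r).length = r := by
  simp [win]; omega

-- the inner j-loop of A over the first t window lengths, t ≤ runAt i
theorem inner_part1 (list : List Int) (k : Int) (i : Nat) (t : Nat)
    (ht : t ≤ runAt list k i) (rez : List Int) :
    (PySem.List.pyRange (i : Int) ((i : Int) + (t : Int)) 1).foldl (fun rez j =>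
      let sub := PySem.List.slice list (some (i : Int)) (some (j + 1))
      if list_elem_div_k sub k && PySem.List.len sub > PySem.List.len rez then sub else rez) rez
    = if t > rez.length then win list i t else rez := by
  induction t generalizing rez with
  | zero => simp [PySem.List.pyRange_one_eq_nil]
  | succ t' ih =>
    have hle : runAt list k i ≤ list.length - i := runAt_le list k i
    have hsp : (i : Int) ≤ (i : Int) + (t' : Int) := by omega
    have hdec : PySem.List.pyRange (i : Int) ((i : Int) + ((t' + 1 : Nat) : Int)) 1
        = PySem.List.pyRange (i : Int) ((i : Int) + (t' : Int)) 1 ++ [(i : Int) + (t' : Int)] := by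
      have : ((i : Int) + ((t' + 1 : Nat) : Int)) = ((i : Int) + (t' : Int)) + 1 := by push_cast; ring
      rw [this, PySem.List.pyRange_one_succ_right hsp]
    rw [hdec, List.foldl_append]
    rw [ih (by omega)]
    simp only [List.foldl_cons, List.foldl_nil]
    have hsub : PySem.List.slice list (some (i : Int)) (some ((i : Int) + (t' : Int) + 1))
        = win list i (t' + 1) := by
      have : (i : Int) + (t' : Int) + 1 = (i : Int) + ((t' + 1 : Nat) : Int) := by push_cast; ring
      rw [this, sub_eq_win]
    have hall : list_elem_div_k (win list i (t' + 1)) k = true := by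
      rw [list_elem_div_k_eq_all]
      exact (all_take_iff k (list.drop i) (t' + 1) (by simp; omega)).2 (by simpa [runAt] using ht)
    have hlen : (win list i (t' + 1)).length = t' + 1 := len_win list i (t' + 1) (by omega)
    by_cases hc : t' > rez.length
    · have hl2 : (win list i t').length = t' := len_win list i t' (by omega)
      simp [hc, hsub, hall, hlen, hl2, PySem.List.len]
      intro h; omega
    · simp only [if_neg hc]
      by_cases hc2 : t' + 1 > rez.length
      · simp [hsub, hall, hlen, PySem.List.len, hc2]
        omega
      · simp [hsub, hall, hlen, PySem.List.len, hc2]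
        intro h; omega

-- indices whose run is not longer than the current result leave A's outer state unchanged
theorem outer_noop (list : List Int) (k : Int) (a b : Int) (rez : List Int)
    (h : ∀ j : Int, a ≤ j → j < b → runAt list k j.toNat ≤ rez.length) :
    (PySem.List.pyRange a b 1).foldl (ostep list k) rez = rez := by
  by_cases hab : b ≤ a
  · simp [PySem.List.pyRange_one_eq_nil hab]
  · have hab' : a < b := by omega
    rw [PySem.List.pyRange_one_cons hab', List.foldl_cons]
    have h1 : ostep list k rez a = rez := by
      simp only [ostep]
      rw [if_neg]
      have := h a le_rfl hab'; omega
    rw [h1]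
    exact outer_noop list k (a + 1) b rez (fun j hj1 hj2 => h j (by omega) hj2)
termination_by (b - a).toNat
decreasing_by omega

-- A's inner loop equals one abstract step
theorem inner_eq_ostep (list : List Int) (k : Int) (i : Int) (h0 : 0 ≤ i)
    (hn : i ≤ (list.length : Int)) (rez : List Int) :
    (PySem.List.pyRange i (PySem.List.len list) 1).foldl (fun rez j =>
      let sub := PySem.List.slice list (some i) (some (j + 1))
      if list_elem_div_k sub k && PySem.List.len sub > PySem.List.len rez then sub else rez) rez
    = ostep list k rez i := by
  obtain ⟨m, rfl⟩ : ∃ m : Nat, i = (m : Int) := ⟨i.toNat, by omega⟩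
  have hm : m ≤ list.length := by exact_mod_cast hn
  have hrle : runAt list k m ≤ list.length - m := runAt_le list k m
  have hsplit : PySem.List.pyRange (m : Int) (PySem.List.len list) 1
      = PySem.List.pyRange (m : Int) ((m : Int) + (runAt list k m : Int)) 1
        ++ PySem.List.pyRange ((m : Int) + (runAt list k m : Int)) (PySem.List.len list) 1 := by
    rw [PySem.List.len_eq]
    exact PySem.List.pyRange_one_append _ _ _ (by omega) (by omega)
  rw [hsplit, List.foldl_append, inner_part1 list k m (runAt list k m) le_rfl rez]
  have hnoop : ∀ (rez' : List Int),
      (PySem.List.pyRange ((m : Int) + (runAt list k m : Int)) (PySem.List.len list) 1).foldl (fun rez j =>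
        let sub := PySem.List.slice list (some (m : Int)) (some (j + 1))
        if list_elem_div_k sub k && PySem.List.len sub > PySem.List.len rez then sub else rez) rez'
      = rez' := by
    intro rez'
    have hcg := PySem.List.foldl_congr_mem
      (l := PySem.List.pyRange ((m : Int) + (runAt list k m : Int)) (PySem.List.len list) 1)
      (f := fun rez j =>
        let sub := PySem.List.slice list (some (m : Int)) (some (j + 1))
        if list_elem_div_k sub k && PySem.List.len sub > PySem.List.len rez then sub else rez)
      (g := fun rez (_ : Int) => rez) (init := rez')
      (by
        intro acc x hx
        rw [PySem.List.mem_pyRange_one] at hx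
        rw [PySem.List.len_eq] at hx
        obtain ⟨j, rfl⟩ : ∃ j : Nat, x = (j : Int) := ⟨x.toNat, by omega⟩
        have hj1 : m + runAt list k m ≤ j := by exact_mod_cast hx.1
        have hj2 : j < list.length := by exact_mod_cast hx.2
        have hsub : PySem.List.slice list (some (m : Int)) (some ((j : Int) + 1))
            = win list m (j + 1 - m) := by
          have : (j : Int) + 1 = (m : Int) + ((j + 1 - m : Nat) : Int) := by omega
          rw [this, sub_eq_win]
        have hallf : ¬ ((win list m (j + 1 - m)).all (dvb k) = true) := by
          intro hcon
          have := (all_take_iff k (list.drop m) (j + 1 - m) (by simp; omega)).1 hcon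
          rw [← runAt] at this
          omega
        simp only [hsub]
        rw [list_elem_div_k_eq_all]
        simp only [Bool.and_eq_true, decide_eq_true_eq]
        rw [if_neg]
        rintro ⟨hc1, -⟩
        exact hallf hc1)
    rw [hcg, List.foldl_fixed]
  rw [hnoop]
  simp [ostep, win]

-- runEndB from index m finds the end of the divisible run starting at m
theorem runEndB_spec (list : List Int) (k : Int) (m : Nat) :
    runEndB list k (PySem.List.len list) (m : Int) = ((m + runAt list k m : Nat) : Int) := by
  rw [runEndB]
  by_cases hm : m < list.length
  · have hget : PySem.List.pyGet? list (m : Int) = some list[m] := by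
      simp [hm]
    by_cases hx : dvb k list[m]
    · have hcond : (m : Int) < PySem.List.len list ∧
          (((PySem.List.pyGet? list (m : Int)).map (fun x => PySem.Int.mod x k == 0)).getD false = true) := by
        constructor
        · rw [PySem.List.len_eq]; exact_mod_cast hm
        · rw [hget]; simpa [dvb] using hx
      rw [dif_pos hcond]
      have h1 : (m : Int) + 1 = ((m + 1 : Nat) : Int) := by omega
      rw [h1, runEndB_spec list k (m + 1)]
      rw [runAt_succ list k m hm]
      simp only [hx, if_true]
      push_cast; ring
    · have hcond : ¬((m : Int) < PySem.List.len list ∧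
          (((PySem.List.pyGet? list (m : Int)).map (fun x => PySem.Int.mod x k == 0)).getD false = true)) := by
        rintro ⟨-, hc⟩
        rw [hget] at hc
        exact hx (by simpa [dvb] using hc)
      rw [dif_neg hcond]
      rw [runAt_succ list k m hm]
      simp [hx]
  · have hcond : ¬((m : Int) < PySem.List.len list ∧
        (((PySem.List.pyGet? list (m : Int)).map (fun x => PySem.Int.mod x k == 0)).getD false = true)) := by
      rintro ⟨hc, -⟩
      rw [PySem.List.len_eq] at hc
      exact hm (by exact_mod_cast hc)
    rw [dif_neg hcond]
    have : runAt list k m = 0 := by have := runAt_le list k m; omega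
    simp [this]
termination_by (list.length - m : Nat)
decreasing_by omega

-- main bridge: A's outer fold from index i equals B's loop from index i
theorem bridge (list : List Int) (k : Int) (i bs bl : Nat)
    (hbs : bs + bl ≤ list.length) :
    (PySem.List.pyRange (i : Int) (PySem.List.len list) 1).foldl (ostep list k) (win list bs bl)
    = (let p := bLoopB list k (PySem.List.len list) (i : Int) (bs : Int) (bl : Int)
       PySem.List.slice list (some p.1) (some (p.1 + p.2))) := by
  have hrez : (win list bs bl).length = bl := len_win list bs bl hbs
  rw [bLoopB]
  by_cases hi : i < list.length
  · have hilt : (i : Int) < PySem.List.len list := by rw [PySem.List.len_eq]; exact_mod_cast hi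
    rw [dif_pos hilt]
    have hget : PySem.List.pyGet? list (i : Int) = some list[i] := by
      simp [hi]
    rw [PySem.List.pyRange_one_cons hilt, List.foldl_cons]
    by_cases hx : dvb k list[i]
    · -- run start: both sides compare the full run length with the current best
      have hg2 : (((PySem.List.pyGet? list (i : Int)).map (fun x => PySem.Int.mod x k == 0)).getD false) = true := by
        rw [hget]; simpa [dvb] using hx
      rw [if_pos hg2]
      have hrpos : 0 < runAt list k i := by
        rw [runAt_succ list k i hi]; simp [hx]
      have hrle : runAt list k i ≤ list.length - i := runAt_le list k i
      have hre : runEndB list k (PySem.List.len list) ((i : Int) + 1) = ((i + runAt list k i : Nat) : Int) := by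
        have h1 : (i : Int) + 1 = ((i + 1 : Nat) : Int) := by push_cast; ring
        rw [h1, runEndB_spec]
        have : i + 1 + runAt list k (i + 1) = i + runAt list k i := by
          rw [runAt_succ list k i hi]; simp [hx]; omega
        rw [this]
      rw [hre]
      set r := runAt list k i with hr
      -- common continuation: after the update decision, indices i+1 … i+r are no-ops and
      -- the loop resumes at i+r+1
      have hcont : ∀ (bs' bl' : Nat), bs' + bl' ≤ list.length → r ≤ bl' →
          (PySem.List.pyRange ((i : Int) + 1) (PySem.List.len list) 1).foldl (ostep list k) (win list bs' bl')
          = (let p := bLoopB list k (PySem.List.len list) (((i + r : Nat) : Int) + 1) (bs' : Int) (bl' : Int)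
             PySem.List.slice list (some p.1) (some (p.1 + p.2))) := by
        intro bs' bl' h1 h2
        have hlen' : (win list bs' bl').length = bl' := len_win list bs' bl' h1
        have hc1 : (i : Int) + 1 ≤ ((min (i + r + 1) list.length : Nat) : Int) := by
          have : i + 1 ≤ min (i + r + 1) list.length := by omega
          exact_mod_cast this
        have hc2 : ((min (i + r + 1) list.length : Nat) : Int) ≤ (list.length : Int) := by
          have : min (i + r + 1) list.length ≤ list.length := by omega
          exact_mod_cast this
        have hsplit : PySem.List.pyRange ((i : Int) + 1) (PySem.List.len list) 1
            = PySem.List.pyRange ((i : Int) + 1) ((min (i + r + 1) list.length : Nat) : Int) 1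
              ++ PySem.List.pyRange ((min (i + r + 1) list.length : Nat) : Int) (PySem.List.len list) 1 := by
          rw [PySem.List.len_eq]
          exact PySem.List.pyRange_one_append _ _ _ hc1 hc2
        rw [hsplit, List.foldl_append]
        have hnoop : List.foldl (ostep list k) (win list bs' bl')
            (PySem.List.pyRange ((i : Int) + 1) ((min (i + r + 1) list.length : Nat) : Int) 1)
            = win list bs' bl' := by
          apply outer_noop
          intro j hj1 hj2
          have hj2' : j < ((i + r + 1 : Nat) : Int) := by
            have hmle : ((min (i + r + 1) list.length : Nat) : Int) ≤ ((i + r + 1 : Nat) : Int) :=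
              Int.ofNat_le.mpr (min_le_left _ _)
            omega
          obtain ⟨t, ht1, ht2, rfl⟩ : ∃ t : Nat, 1 ≤ t ∧ t ≤ r ∧ j = ((i + t : Nat) : Int) :=
            ⟨j.toNat - i, by omega, by omega, by omega⟩
          have hrt : runAt list k (i + t) = r - t := runAt_add list k i t (by omega)
          simp only [Int.toNat_natCast]
          omega
        rw [hnoop]
        have hreq : PySem.List.pyRange ((min (i + r + 1) list.length : Nat) : Int) (PySem.List.len list) 1
            = PySem.List.pyRange ((i + r + 1 : Nat) : Int) (PySem.List.len list) 1 := by
          by_cases hcase : i + r + 1 ≤ list.length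
          · rw [min_eq_left hcase]
          · rw [min_eq_right (by omega)]
            rw [PySem.List.len_eq]
            rw [PySem.List.pyRange_one_eq_nil (by omega), PySem.List.pyRange_one_eq_nil (by exact_mod_cast (by omega : (list.length : Int) ≤ ((i + r + 1 : Nat) : Int)))]
        rw [hreq]
        have hfin := bridge list k (i + r + 1) bs' bl' h1
        have hcast : ((i + r : Nat) : Int) + 1 = ((i + r + 1 : Nat) : Int) := by push_cast; ring
        rw [hcast]
        exact hfin
      have hstep : ostep list k (win list bs bl) (i : Int) = win list (if r > bl then i else bs) (if r > bl then r else bl) := by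
        simp only [ostep, Int.toNat_natCast, ← hr, hrez]
        by_cases hc : r > bl <;> simp [hc]
      rw [hstep]
      have hsub : ((i + r : Nat) : Int) - (i : Int) = (r : Int) := by push_cast; ring
      by_cases hc : r > bl
      · rw [if_pos hc, if_pos hc, hcont i r (by omega) le_rfl]
        simp only [hsub]
        rw [if_pos (show (r : Int) > (bl : Int) from by exact_mod_cast hc)]
      · rw [if_neg hc, if_neg hc, hcont bs bl hbs (by omega)]
        simp only [hsub]
        rw [if_neg (show ¬ ((r : Int) > (bl : Int)) from by exact_mod_cast hc)]
    · -- not divisible at i: both sides just advance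
      have hg2 : ¬ ((((PySem.List.pyGet? list (i : Int)).map (fun x => PySem.Int.mod x k == 0)).getD false) = true) := by
        rw [hget]; simpa [dvb] using hx
      rw [if_neg hg2]
      have hstep : ostep list k (win list bs bl) (i : Int) = win list bs bl := by
        simp only [ostep, Int.toNat_natCast]
        rw [runAt_succ list k i hi, if_neg (by simp [hx])]
      rw [hstep]
      have h1 : (i : Int) + 1 = ((i + 1 : Nat) : Int) := by push_cast; ring
      rw [h1]
      exact bridge list k (i + 1) bs bl hbs
  · rw [dif_neg (by rw [PySem.List.len_eq]; exact fun hcon => hi (by exact_mod_cast hcon))]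
    rw [PySem.List.pyRange_one_eq_nil (by rw [PySem.List.len_eq]; exact_mod_cast (Nat.le_of_not_lt hi))]
    simp only [List.foldl_nil]
    have hcast : (bs : Int) + (bl : Int) = (bs : Int) + ((bl : Nat) : Int) := rfl
    exact (sub_eq_win list bs bl).symm
termination_by (list.length - i : Nat)
decreasing_by
  · omega
  · omega

-- ===== VERDICT (by name: the statement is the Claim_ definition above) =====
theorem get_longest_div_k_spec : Claim_equal_get_longest_div_k := by
  intro list k _ _
  unfold Spec_get_longest_div_k
  show get_longest_div_k list k = get_longest_div_k_alt list k
  unfold get_longest_div_k get_longest_div_k_alt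
  simp only []
  have hcg := PySem.List.foldl_congr_mem
    (l := PySem.List.pyRange 0 (PySem.List.len list) 1)
    (f := fun rez i =>
      (PySem.List.pyRange i (PySem.List.len list) 1).foldl (fun rez j =>
        let sub := PySem.List.slice list (some i) (some (j + 1))
        if list_elem_div_k sub k && PySem.List.len sub > PySem.List.len rez then sub else rez) rez)
    (g := ostep list k) (init := ([] : List Int))
    (by
      intro acc x hx
      rw [PySem.List.mem_pyRange_one, PySem.List.len_eq] at hx
      exact inner_eq_ostep list k x hx.1 (le_of_lt hx.2) acc)
  rw [hcg]
  have h0 : (0 : Int) = ((0 : Nat) : Int) := rfl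
  have := bridge list k 0 0 0 (by omega)
  simpa [win] using this
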